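-- pv_equiv track=rewrite | github.com/nlnuli/STP-MSTP-Protocol- | 叶文 代码及技术文档/code/MSTP/mstp.py | count_num
-- ===== SOURCE A (Python) =====
-- def count_num(list1):
--     list2 = list1[:]
--     n = len(list1)
--     for i in range(n):
--         list2[i] = list2[i][0:4]
--     dict1 = dict()
--
--     for item in list2:
--         if item in dict1:  # 直接判断key在不在字典中
--             dict1[item] += 1
--         else:
--             dict1[item] = 1
--     list2 = list()
--     for i in dict1:
--         if dict1[i] > 1:
--             for j in list1:
--                 if i in j:
--                     list2.append(j)
--     return list2
-- ===== SOURCE B (Python) =====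
-- def count_num(list1):
--     # one-pass bucketing: precompute each string's set of substrings of
--     # length <= 4 and append it to the bucket of every duplicate prefix key
--     counts = {}
--     order = []
--     for s in list1:
--         p = s[:4]
--         if p in counts:
--             counts[p] += 1
--         else:
--             counts[p] = 1
--             order.append(p)
--     buckets = {k: [] for k in order if counts[k] > 1}
--     for s in list1:
--         subs = set()
--         for i in range(len(s) + 1):
--             for n in range(5):
--                 subs.add(s[i:i + n])
--         for sub in subs:
--             if sub in buckets:
--                 buckets[sub].append(s)
--     out = []
--     for k in buckets:
--         out.extend(buckets[k])
--     return out
-- ===== Notes on version B (the rewrite author's own statement) =====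
-- stated objective: faster
-- what changed: Instead of rescanning the whole list for each duplicate 4-char prefix key (substring test per key per string), B precomputes each string's set of length-<=4 substrings once and buckets the string into every duplicate key's bucket in a single pass, then concatenates the buckets in key order.
import Mathlib
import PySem

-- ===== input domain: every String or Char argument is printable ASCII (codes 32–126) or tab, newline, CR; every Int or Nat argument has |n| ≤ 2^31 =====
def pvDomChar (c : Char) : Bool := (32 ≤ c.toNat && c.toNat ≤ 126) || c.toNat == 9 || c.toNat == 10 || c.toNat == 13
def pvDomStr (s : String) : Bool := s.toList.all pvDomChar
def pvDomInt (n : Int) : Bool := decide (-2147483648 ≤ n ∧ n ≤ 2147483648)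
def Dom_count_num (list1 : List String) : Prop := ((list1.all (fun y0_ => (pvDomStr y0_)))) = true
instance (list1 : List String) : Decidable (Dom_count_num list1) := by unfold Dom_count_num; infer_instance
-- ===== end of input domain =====

-- B replaces A's per-duplicate-key rescans of the whole list with one-pass bucketing over each
-- string's set of length-≤4 substrings (objective: faster). Both programs are pure; equivalence
-- is on the return value.

-- ===== PORT A =====
def count_num (list1 : List String) : List String :=
  let list2 := list1
  let n := (list1.length : Int)
  let list2 := (PySem.List.pyRange 0 n 1).foldl
    (fun l i => PySem.List.pySetD l i (PySem.Str.slice (PySem.List.pyGetD l i "") none (some 4))) list2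
  let dict1 : PySem.Dict String Int := list2.foldl
    (fun d item => if d.contains item then d.modify item 0 (· + 1) else d.insert item 1)
    PySem.Dict.empty
  dict1.keys.foldl
    (fun l2 i =>
      if dict1.getD i 0 > 1 then
        list1.foldl (fun l2 j => if PySem.Str.isIn i j then l2 ++ [j] else l2) l2
      else l2) []

-- ===== PORT B =====
-- s[:4]
def pvPre4 (s : String) : String := PySem.Str.slice s none (some 4)

-- one step of B's combined count/first-occurrence-order loop
def pvCountStep (st : PySem.Dict String Int × List String) (s : String) :
    PySem.Dict String Int × List String :=
  let p := pvPre4 s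
  if st.1.contains p then (st.1.modify p 0 (· + 1), st.2) else (st.1.insert p 1, st.2 ++ [p])

-- the set {s[i:i+n] | 0 ≤ i ≤ len(s), 0 ≤ n < 5}
def pvSubs (s : String) : PySem.Set String :=
  (PySem.List.pyRange 0 (PySem.Str.len s + 1) 1).foldl
    (fun st i => (PySem.List.pyRange 0 5 1).foldl
        (fun st n => PySem.Set.add st (PySem.Str.slice s (some i) (some (i + n)))) st)
    PySem.Set.empty

-- one step of B's bucketing loop: append s to the bucket of every duplicate key occurring in s
def pvBucketStep (d : PySem.Dict String (List String)) (s : String) :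
    PySem.Dict String (List String) :=
  (pvSubs s).foldl (fun d sub => if d.contains sub then d.modify sub [] (· ++ [s]) else d) d

def count_num_alt (list1 : List String) : List String :=
  let st := list1.foldl pvCountStep (PySem.Dict.empty, [])
  let counts := st.1
  let order := st.2
  let buckets : PySem.Dict String (List String) :=
    (order.filter (fun k => counts.getD k 0 > 1)).foldl
      (fun d k => d.insert k ([] : List String)) PySem.Dict.empty
  let buckets := list1.foldl pvBucketStep buckets
  buckets.keys.foldl (fun out k => out ++ buckets.getD k []) []

-- ===== PRECONDITION & SPEC =====
def Spec_count_num (list1 : List String) (out : List String) : Prop := out = count_num_alt list1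
instance (list1 : List String) (out : List String) : Decidable (Spec_count_num list1 out) := by unfold Spec_count_num; infer_instance

-- ===== CLAIM (what is proved, stated in full; the proofs are below) =====
def Claim_equal_count_num : Prop := ∀ (list1 : List String), Dom_count_num list1 → Spec_count_num list1 (count_num list1)

-- ===== LEMMAS AND PROOFS =====

-- the substring-generation list behind pvSubs
def pvGen (s : String) : List String :=
  (PySem.List.pyRange 0 (PySem.Str.len s + 1) 1).flatMap
    (fun i => (PySem.List.pyRange 0 5 1).map (fun n => PySem.Str.slice s (some i) (some (i + n))))

-- A's in-place prefix loop is map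
theorem pv_inplace (f : String → String) (xs ys : List String) :
    (PySem.List.pyRange (ys.length : Int) ((ys.length : Int) + (xs.length : Int)) 1).foldl
      (fun l i => PySem.List.pySetD l i (f (PySem.List.pyGetD l i ""))) (ys ++ xs)
    = ys ++ xs.map f := by
  induction xs generalizing ys with
  | nil =>
    rw [PySem.List.pyRange_one_eq_nil (by simp)]
    simp
  | cons x xs ih =>
    rw [PySem.List.pyRange_one_cons (by push_cast [List.length_cons]; omega)]
    rw [List.foldl_cons]
    have hget : PySem.List.pyGetD (ys ++ x :: xs) (ys.length : Int) "" = x := by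
      simp [PySem.List.pyGetD_natCast, List.getD]
    have hset : PySem.List.pySetD (ys ++ x :: xs) (ys.length : Int) (f x)
        = (ys ++ [f x]) ++ xs := by
      simp [PySem.List.pySetD_natCast]
    rw [hget, hset]
    have h2 : (ys.length : Int) + 1 = ((ys ++ [f x]).length : Int) := by simp
    have h3 : (ys.length : Int) + ((x :: xs).length : Int) = ((ys ++ [f x]).length : Int) + (xs.length : Int) := by
      simp; omega
    rw [h2, h3, ih (ys ++ [f x])]
    simp

theorem pv_map_loop (f : String → String) (xs : List String) :
    (PySem.List.pyRange 0 (xs.length : Int) 1).foldl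
      (fun l i => PySem.List.pySetD l i (f (PySem.List.pyGetD l i ""))) xs
    = xs.map f := by
  have h := pv_inplace f xs []
  simpa using h

-- modify of an absent key is insert
theorem pv_modify_insert (d : PySem.Dict String Int) (x : String) (h : d.contains x = false) :
    d.modify x 0 (· + 1) = d.insert x 1 := by
  simp [PySem.Dict.modify, PySem.Dict.insert, h, PySem.Dict.getD_of_not_contains d 0 h]

-- A's counting fold is Counter
theorem pv_afold (l : List String) (d : PySem.Dict String Int) :
    l.foldl (fun d item => if d.contains item then d.modify item 0 (· + 1) else d.insert item 1) d
    = l.foldl (fun d x => d.modify x 0 (· + 1)) d := by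
  induction l generalizing d with
  | nil => rfl
  | cons x l ih =>
    simp only [List.foldl_cons]
    by_cases h : d.contains x = true
    · rw [if_pos h, ih]
    · rw [if_neg h, pv_modify_insert d x (by simpa using h), ih]

-- B's count/order loop invariant
theorem pv_countloop (l : List String) (pref : List String) :
    l.foldl pvCountStep (PySem.Dict.counter pref, PySem.Set.ofList pref)
    = (PySem.Dict.counter (pref ++ l.map pvPre4), PySem.Set.ofList (pref ++ l.map pvPre4)) := by
  induction l generalizing pref with
  | nil => simp
  | cons s l ih =>
    rw [List.foldl_cons]
    have hstep : pvCountStep (PySem.Dict.counter pref, PySem.Set.ofList pref) s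
        = (PySem.Dict.counter (pref ++ [pvPre4 s]), PySem.Set.ofList (pref ++ [pvPre4 s])) := by
      unfold pvCountStep
      rw [PySem.Dict.counter_append_singleton, PySem.Set.ofList_append_singleton]
      by_cases h : pvPre4 s ∈ pref
      · have hc : (PySem.Dict.counter pref).contains (pvPre4 s) = true := by
          rw [PySem.Dict.contains_counter]; simpa using h
        rw [PySem.Set.add_of_mem (by simpa [PySem.Set.mem_ofList] using h)]
        simp [hc]
      · have hc : (PySem.Dict.counter pref).contains (pvPre4 s) = false := by
          rw [PySem.Dict.contains_counter]; simpa using h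
        rw [PySem.Set.add_of_not_mem (by simpa [PySem.Set.mem_ofList] using h)]
        simp only [hc, Bool.false_eq_true, if_false]
        rw [← pv_modify_insert _ _ hc]
    rw [hstep, ih (pref ++ [pvPre4 s])]
    simp

-- pvSubs is the set of the generation list
theorem pv_foldl_update {α : Type} [BEq α] (l : List Int) (g : Int → List α) (s : PySem.Set α) :
    l.foldl (fun st i => PySem.Set.update st (g i)) s = PySem.Set.update s (l.flatMap g) := by
  induction l generalizing s with
  | nil => rw [List.foldl_nil, List.flatMap_nil, PySem.Set.update_nil]
  | cons i l ih => rw [List.foldl_cons, List.flatMap_cons, PySem.Set.update_append, ih]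

theorem pv_subs_eq (s : String) : pvSubs s = PySem.Set.ofList (pvGen s) := by
  unfold pvSubs pvGen
  simp only [← PySem.Set.update_map_eq_foldl_add]
  rw [pv_foldl_update, PySem.Set.update_empty]

-- membership in the generation list = infix of length ≤ 4
theorem pv_mem_gen (s k : String) :
    k ∈ pvGen s ↔ (k.toList <:+: s.toList ∧ k.toList.length ≤ 4) := by
  unfold pvGen
  simp only [List.mem_flatMap, List.mem_map, PySem.List.mem_pyRange_one, PySem.Str.len_eq]
  constructor
  · rintro ⟨i, ⟨hi0, hilt⟩, n, ⟨hn0, hn5⟩, rfl⟩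
    have htl : (PySem.Str.slice s (some i) (some (i + n))).toList
        = (s.toList.drop i.toNat).take n.toNat := by
      rw [PySem.Str.toList_slice, PySem.Chars.slice_eq_listSlice,
        PySem.List.slice_toNat _ hi0 (by omega)]
      congr 1
      omega
    rw [htl]
    constructor
    · exact ((List.take_prefix _ _).isInfix).trans ((List.drop_suffix _ _).isInfix)
    · calc (List.take n.toNat (s.toList.drop i.toNat)).length ≤ n.toNat := by
            simp [List.length_take]
        _ ≤ 4 := by omega
  · rintro ⟨⟨pre, suf, hs⟩, hlen⟩
    refine ⟨(pre.length : Int), ⟨by positivity, ?_⟩, (k.toList.length : Int), ⟨by positivity, by exact_mod_cast by omega⟩, ?_⟩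
    · have : pre.length ≤ s.toList.length := by
        rw [← hs]; simp
      omega
    · rw [← String.toList_inj]
      rw [PySem.Str.toList_slice, PySem.Chars.slice_eq_listSlice,
        PySem.List.slice_toNat _ (by positivity) (by positivity)]
      have h1 : ((pre.length : Int) + (k.toList.length : Int)).toNat - (pre.length : Int).toNat
          = k.toList.length := by omega
      rw [h1]
      have h2 : ((pre.length : Int)).toNat = pre.length := by omega
      rw [h2, ← hs, List.append_assoc, List.drop_left, List.take_left]

-- containment in pvSubs = Python's substring test, for keys of length ≤ 4
theorem pv_contains_subs' (s k : String) (hk : k.toList.length ≤ 4)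
    (gen : List String)
    (hmem : k ∈ gen ↔ (k.toList <:+: s.toList ∧ k.toList.length ≤ 4)) :
    PySem.Set.contains (PySem.Set.ofList gen) k = PySem.Str.isIn k s := by
  cases hIn : PySem.Str.isIn k s with
  | true =>
    have hinf : k.toList <:+: s.toList := (PySem.Str.isIn_iff_infix _ _).mp hIn
    have : k ∈ PySem.Set.ofList gen := (PySem.Set.mem_ofList _ _).mpr (hmem.mpr ⟨hinf, hk⟩)
    exact (PySem.Set.contains_iff _ _).mpr this
  | false =>
    have hninf : ¬ k.toList <:+: s.toList := by
      intro h
      have h2 := (PySem.Str.isIn_iff_infix k s).mpr h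
      rw [hIn] at h2
      exact absurd h2 (by simp)
    have hnm : k ∉ PySem.Set.ofList gen := by
      rw [PySem.Set.mem_ofList, hmem]
      exact fun h => hninf h.1
    cases hc : PySem.Set.contains (PySem.Set.ofList gen) k with
    | false => rfl
    | true => exact absurd ((PySem.Set.contains_iff _ _).mp hc) hnm
theorem pv_contains_subs (s k : String) (hk : k.toList.length ≤ 4) :
    PySem.Set.contains (pvSubs s) k = PySem.Str.isIn k s := by
  rw [pv_subs_eq]
  exact pv_contains_subs' s k hk (pvGen s) (pv_mem_gen s k)

-- the per-string bucket update: contains is preserved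
theorem pv_bstep_contains (s : String) (subs : List String)
    (d : PySem.Dict String (List String)) (k : String) :
    (subs.foldl (fun d sub => if d.contains sub then d.modify sub [] (· ++ [s]) else d) d).contains k
    = d.contains k := by
  induction subs generalizing d with
  | nil => rfl
  | cons sub rest ih =>
    simp only [List.foldl_cons]
    by_cases h : d.contains sub = true
    · rw [if_pos h, ih]
      rw [PySem.Dict.contains_modify]
      by_cases hk : k = sub
      · subst hk; simp [h]
      · simp [hk]
    · rw [if_neg h, ih]

-- keys are preserved too
theorem pv_bstep_keys (s : String) (subs : List String)
    (d : PySem.Dict String (List String)) :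
    (subs.foldl (fun d sub => if d.contains sub then d.modify sub [] (· ++ [s]) else d) d).keys
    = d.keys := by
  induction subs generalizing d with
  | nil => rfl
  | cons sub rest ih =>
    simp only [List.foldl_cons]
    by_cases h : d.contains sub = true
    · rw [if_pos h, ih, PySem.Dict.keys_modify, PySem.Dict.keys_insert_of_contains _ _ h]
    · rw [if_neg h, ih]

-- the per-string bucket update on values
theorem pv_bstep_getD (s : String) (subs : List String) (hnd : subs.Nodup)
    (d : PySem.Dict String (List String)) (k : String) :
    (subs.foldl (fun d sub => if d.contains sub then d.modify sub [] (· ++ [s]) else d) d).getD k []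
    = if k ∈ subs ∧ d.contains k = true then d.getD k [] ++ [s] else d.getD k [] := by
  induction subs generalizing d with
  | nil => simp
  | cons sub rest ih =>
    rw [List.foldl_cons]
    rcases List.nodup_cons.mp hnd with ⟨hns, hndr⟩
    by_cases hks : k = sub
    · subst hks
      by_cases hc : d.contains k = true
      · rw [if_pos hc, ih hndr]
        rw [if_neg (by intro h; exact hns h.1)]
        rw [if_pos ⟨by simp, hc⟩]
        exact PySem.Dict.getD_modify_self d k [] _
      · rw [if_neg hc, ih hndr]
        rw [if_neg (by intro h; exact hns h.1)]
        rw [if_neg (by intro h; exact hc h.2)]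
    · have hstep : ∀ d' : PySem.Dict String (List String),
          (if d'.contains sub = true then d'.modify sub [] (· ++ [s]) else d').getD k []
            = d'.getD k [] := by
        intro d'
        by_cases hc : d'.contains sub = true
        · rw [if_pos hc]; exact PySem.Dict.getD_modify_of_ne d' [] _ hks
        · rw [if_neg hc]
      have hcont : ∀ d' : PySem.Dict String (List String),
          (if d'.contains sub = true then d'.modify sub [] (· ++ [s]) else d').contains k
            = d'.contains k := by
        intro d'
        by_cases hc : d'.contains sub = true
        · rw [if_pos hc, PySem.Dict.contains_modify]
          simp [hks]
        · rw [if_neg hc]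
      rw [ih hndr, hstep, hcont]
      simp [List.mem_cons, hks]

-- the whole bucketing loop fills each existing bucket with the filter
theorem pv_bucketloop (l : List String) (d : PySem.Dict String (List String)) (k : String)
    (hk : d.contains k = true) (hlen : k.toList.length ≤ 4) :
    (l.foldl pvBucketStep d).getD k [] = d.getD k [] ++ l.filter (fun j => PySem.Str.isIn k j) := by
  induction l generalizing d with
  | nil => simp
  | cons s l ih =>
    rw [List.foldl_cons, List.filter_cons]
    have hc' : (pvBucketStep d s).contains k = true := by
      rw [pvBucketStep, pv_bstep_contains]; exact hk
    rw [ih _ hc']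
    have hmem : (k ∈ pvSubs s) ↔ PySem.Str.isIn k s = true := by
      rw [← PySem.Set.contains_iff, pv_contains_subs s k hlen]
    have hgd : (pvBucketStep d s).getD k []
        = if PySem.Str.isIn k s then d.getD k [] ++ [s] else d.getD k [] := by
      rw [pvBucketStep, pv_bstep_getD s _ (by rw [pv_subs_eq]; exact PySem.Set.nodup_ofList _) d k]
      by_cases h : PySem.Str.isIn k s = true
      · rw [if_pos ⟨hmem.mpr h, hk⟩, if_pos h]
      · rw [if_neg (fun hh => h (hmem.mp hh.1)), if_neg h]
    rw [hgd]
    by_cases h : PySem.Str.isIn k s = true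
    · rw [if_pos h, if_pos h]
      simp
    · rw [if_neg h, if_neg h]

theorem pv_bucket_keys (l : List String) (d : PySem.Dict String (List String)) :
    (l.foldl pvBucketStep d).keys = d.keys := by
  induction l generalizing d with
  | nil => rfl
  | cons s l ih => simp only [List.foldl_cons]; rw [ih, pvBucketStep, pv_bstep_keys]

-- generic guarded-append fold
theorem pv_foldl_if_append {α β : Type} (p : α → Prop) [DecidablePred p] (g : α → List β)
    (l : List α) (acc : List β) :
    l.foldl (fun acc x => if p x then acc ++ g x else acc) acc
    = acc ++ (l.filter (fun x => decide (p x))).flatMap g := by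
  induction l generalizing acc with
  | nil => simp
  | cons x l ih =>
    by_cases h : p x
    · simp [h, ih, List.flatMap_cons]
    · simp [h, ih]

-- every duplicate key is a 4-prefix, hence of length ≤ 4
theorem pv_pre4_len (s : String) : (pvPre4 s).toList.length ≤ 4 := by
  unfold pvPre4
  rw [PySem.Str.toList_slice, PySem.Chars.slice_eq_listSlice,
    PySem.List.slice_to _ (by norm_num)]
  simp [List.length_take]

-- the inner per-key rescan of A, as a filter
theorem pv_inner_filter (i : String) (list1 : List String) (l2 : List String) :
    list1.foldl (fun l2 j => if PySem.Str.isIn i j then l2 ++ [j] else l2) l2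
    = l2 ++ list1.filter (fun j => PySem.Str.isIn i j) := by
  have h := PySem.List.foldl_append_if (fun j => PySem.Str.isIn i j) (fun j => j) list1 l2
  simpa using h

-- B's bucket phase produces exactly the concatenation of the per-key filters
theorem pv_B_eq (list1 dup : List String) (hdupnd : dup.Nodup)
    (hlen : ∀ k ∈ dup, k.toList.length ≤ 4) :
    (List.foldl pvBucketStep (List.foldl (fun d k => d.insert k ([] : List String)) PySem.Dict.empty dup) list1).keys.foldl
      (fun out k => out ++ (List.foldl pvBucketStep (List.foldl (fun d k => d.insert k ([] : List String)) PySem.Dict.empty dup) list1).getD k []) []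
    = dup.flatMap (fun i => list1.filter (fun j => PySem.Str.isIn i j)) := by
  have hitems : (List.foldl (fun d k => d.insert k ([] : List String)) PySem.Dict.empty dup).items
      = dup.map (fun k => (k, ([] : List String))) := by
    have h := PySem.Dict.items_foldl_insert_fresh dup (fun k => k) (fun _ => ([] : List String))
      PySem.Dict.empty (by intro a _; exact PySem.Dict.contains_empty a) (by simpa using hdupnd)
    simpa using h
  have hkeys0 : (List.foldl (fun d k => d.insert k ([] : List String)) PySem.Dict.empty dup).keys = dup := by
    simp [PySem.Dict.keys, hitems, Function.comp_def]
  have hkeys2 : (List.foldl pvBucketStep (List.foldl (fun d k => d.insert k ([] : List String)) PySem.Dict.empty dup) list1).keys = dup := by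
    rw [pv_bucket_keys, hkeys0]
  rw [hkeys2, PySem.List.foldl_append_eq_flatMap, List.nil_append]
  refine List.flatMap_congr ?_
  intro k hkdup
  have hcont0 : (List.foldl (fun d k => d.insert k ([] : List String)) PySem.Dict.empty dup).contains k = true := by
    rw [PySem.Dict.contains_iff_mem_keys, hkeys0]; exact hkdup
  have hmemit : (k, ([] : List String)) ∈ (List.foldl (fun d k => d.insert k ([] : List String)) PySem.Dict.empty dup).items := by
    rw [hitems]
    exact List.mem_map.mpr ⟨k, hkdup, rfl⟩
  have hget0 : (List.foldl (fun d k => d.insert k ([] : List String)) PySem.Dict.empty dup).getD k [] = [] :=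
    PySem.Dict.getD_of_mem_items _ hmemit (by rw [hkeys0]; exact hdupnd) []
  rw [pv_bucketloop list1 _ k hcont0 (hlen k hkdup), hget0, List.nil_append]

-- ===== VERDICT (by name: the statement is the Claim_ definition above) =====
theorem count_num_spec : Claim_equal_count_num := by
  unfold Claim_equal_count_num Spec_count_num
  intro list1 _
  simp only [count_num, count_num_alt]
  rw [pv_map_loop (fun s => PySem.Str.slice s none (some 4)) list1]
  rw [pv_afold, ← PySem.Dict.counter_eq_foldl]
  rw [show ((PySem.Dict.empty : PySem.Dict String Int), ([] : List String))
        = (PySem.Dict.counter ([] : List String), PySem.Set.ofList ([] : List String)) from rfl,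
    pv_countloop list1 []]
  simp only [List.nil_append]
  rw [show List.map pvPre4 list1 = List.map (fun s => PySem.Str.slice s none (some 4)) list1 from rfl]
  -- A's side
  rw [PySem.Dict.keys_counter]
  simp only [pv_inner_filter]
  rw [pv_foldl_if_append
    (fun i => (PySem.Dict.counter (list1.map (fun s => PySem.Str.slice s none (some 4)))).getD i 0 > 1)
    (fun i => list1.filter (fun j => PySem.Str.isIn i j))
    (PySem.Set.ofList (list1.map (fun s => PySem.Str.slice s none (some 4)))) []]
  simp only [List.nil_append]
  -- B's side
  have hdupnd : ((PySem.Set.ofList (list1.map (fun s => PySem.Str.slice s none (some 4)))).filter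
      (fun k => decide ((PySem.Dict.counter (list1.map (fun s => PySem.Str.slice s none (some 4)))).getD k 0 > 1))).Nodup :=
    (PySem.Set.nodup_ofList _).filter _
  have hlen : ∀ k ∈ (PySem.Set.ofList (list1.map (fun s => PySem.Str.slice s none (some 4)))).filter
      (fun k => decide ((PySem.Dict.counter (list1.map (fun s => PySem.Str.slice s none (some 4)))).getD k 0 > 1)),
      k.toList.length ≤ 4 := by
    intro k hk
    have hkpres : k ∈ list1.map (fun s => PySem.Str.slice s none (some 4)) :=
      (PySem.Set.mem_ofList _ _).mp (List.mem_of_mem_filter hk)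
    rcases List.mem_map.mp hkpres with ⟨j, _, rfl⟩
    exact pv_pre4_len j
  exact (pv_B_eq list1 _ hdupnd hlen).symm
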